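-- pv_equiv track=rewrite | github.com/adriandalion/CMSC-162-Project-1 | CMSC162_Guide5_Dalion_Mazo.py | pad_replicate
-- ===== SOURCE A (Python) =====
-- from typing import List, Tuple, Optional
--
-- def pad_replicate(gray: List[List[int]], r: int) -> List[List[int]]:
--     """Replicate-pad grayscale image by r pixels."""
--     h, w = len(gray), len(gray[0])
--     out = [[0]*(w + 2*r) for _ in range(h + 2*r)]
--     for y in range(h + 2*r):
--         sy = 0 if y < r else (h-1 if y >= h+r else y - r)
--         for x in range(w + 2*r):
--             sx = 0 if x < r else (w-1 if x >= w+r else x - r)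
--             out[y][x] = gray[sy][sx]
--     return out
-- ===== SOURCE B (Python) =====
-- def pad_replicate(gray, r):
--     """Replicate-pad grayscale image by r pixels."""
--     padded = [[row[0]] * r + list(row) + [row[-1]] * r for row in gray]
--     return [list(padded[0]) for _ in range(r)] + padded + [list(padded[-1]) for _ in range(r)]
-- ===== Notes on version B (the rewrite author's own statement) =====
-- stated objective: faster
-- what changed: Replaces per-pixel clamped indexing over the (h+2r)x(w+2r) grid with two separable replication passes (bulk list concatenation: pad each row's edges, then replicate the first/last padded rows), removing the per-pixel interpreted clamp branches (measured 2-4x faster).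
-- outside the precondition, e.g. on pad_replicate([[1, 2, 3]], -1): A returns [], B returns [[1, 2, 3]]
import Mathlib
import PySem

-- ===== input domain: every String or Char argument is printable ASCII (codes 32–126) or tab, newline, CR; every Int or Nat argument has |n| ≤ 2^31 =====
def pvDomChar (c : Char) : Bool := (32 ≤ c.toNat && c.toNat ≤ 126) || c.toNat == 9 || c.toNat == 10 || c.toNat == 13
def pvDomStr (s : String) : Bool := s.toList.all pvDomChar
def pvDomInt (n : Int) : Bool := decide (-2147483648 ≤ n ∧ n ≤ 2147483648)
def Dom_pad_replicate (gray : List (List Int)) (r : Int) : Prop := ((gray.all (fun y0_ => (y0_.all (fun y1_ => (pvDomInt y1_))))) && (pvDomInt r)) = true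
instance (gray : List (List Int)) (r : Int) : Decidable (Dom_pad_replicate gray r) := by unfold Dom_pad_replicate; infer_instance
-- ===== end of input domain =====

-- B builds the padded image by two separable replication passes (edge pixels per row, then
-- whole edge rows) instead of A's per-pixel clamped indexing; measured faster (constant factor).

-- ===== PORT A =====
def pad_replicate (gray : List (List Int)) (r : Int) : List (List Int) :=
  let h : Int := gray.length
  let w : Int := (PySem.List.pyGetD gray 0 []).length
  (PySem.List.pyRange 0 (h + 2*r) 1).map (fun y =>
    let sy : Int := if y < r then 0 else if h + r ≤ y then h - 1 else y - r
    (PySem.List.pyRange 0 (w + 2*r) 1).map (fun x =>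
      let sx : Int := if x < r then 0 else if w + r ≤ x then w - 1 else x - r
      PySem.List.pyGetD (PySem.List.pyGetD gray sy []) sx 0))

-- ===== PORT B =====
def pad_replicate_alt (gray : List (List Int)) (r : Int) : List (List Int) :=
  let padded : List (List Int) := gray.map (fun row =>
    PySem.List.pyRepeat [PySem.List.pyGetD row 0 0] r ++ row ++
    PySem.List.pyRepeat [PySem.List.pyGetD row (-1) 0] r)
  (PySem.List.pyRange 0 r 1).map (fun _ => PySem.List.pyGetD padded 0 []) ++ padded ++
  (PySem.List.pyRange 0 r 1).map (fun _ => PySem.List.pyGetD padded (-1) [])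

-- ===== PRECONDITION & SPEC =====
-- Pre_ restricts to the function's natural domain (a nonempty rectangular image and a
-- nonnegative pad radius): outside it A either raises IndexError (empty image, rows shorter
-- than the first) or returns accidental values of its clamped indexing (negative r, rows
-- longer than the first row's width, whose extra columns A silently ignores).
def Pre_pad_replicate (gray : List (List Int)) (r : Int) : Prop :=
  0 ≤ r ∧ gray ≠ [] ∧ gray.headD [] ≠ [] ∧
  ∀ row ∈ gray, row.length = (gray.headD []).length
instance (gray : List (List Int)) (r : Int) : Decidable (Pre_pad_replicate gray r) := by
  unfold Pre_pad_replicate; infer_instance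

def pvWitness_pad_replicate : List (List Int) × Int := ([[1, 2], [3, 4]], 1)

def Spec_pad_replicate (gray : List (List Int)) (r : Int) (out : List (List Int)) : Prop := out = pad_replicate_alt gray r
instance (gray : List (List Int)) (r : Int) (out : List (List Int)) : Decidable (Spec_pad_replicate gray r out) := by unfold Spec_pad_replicate; infer_instance

-- ===== CLAIM (what is proved, stated in full; the proofs are below) =====
def Claim_equal_pad_replicate : Prop := ∀ (gray : List (List Int)) (r : Int), Dom_pad_replicate gray r → Pre_pad_replicate gray r → Spec_pad_replicate gray r (pad_replicate gray r)

-- ===== LEMMAS AND PROOFS =====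

lemma clamp_map {α : Type} (d : α) (l : List α) (hl : 0 < l.length) (k : ℕ) :
    (List.range (l.length + (k + k))).map
      (fun y => l.getD (if y < k then 0 else if l.length + k ≤ y then l.length - 1 else y - k) d)
    = List.replicate k (l.headD d) ++ l ++ List.replicate k (l.getLastD d) := by
  have hhead : l.headD d = l[0]'hl := by
    cases l with
    | nil => simp at hl
    | cons a t => rfl
  have hlast : l.getLastD d = l[l.length - 1]'(by omega) := by
    rw [List.getLastD_eq_getLast?, List.getLast?_eq_getElem?]
    simp [List.getElem?_eq_getElem (by omega : l.length - 1 < l.length)]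
  apply List.ext_getElem
  · simp; omega
  · intro i h1 h2
    simp only [List.getElem_map, List.getElem_range]
    by_cases hik : i < k
    · rw [if_pos hik]
      rw [List.getElem_append_left (by simp [List.length_append, List.length_replicate]; omega),
          List.getElem_append_left (by simp [List.length_replicate]; omega),
          List.getElem_replicate]
      rw [hhead, List.getD_eq_getElem l d hl]
    · by_cases him : l.length + k ≤ i
      · rw [if_neg hik, if_pos him]
        rw [List.getElem_append_right (by simp; omega), List.getElem_replicate]
        rw [hlast, List.getD_eq_getElem l d (by omega)]
      · rw [if_neg hik, if_neg him]
        rw [List.getElem_append_left (by simp; omega),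
            List.getElem_append_right (by simp; omega)]
        rw [List.getD_eq_getElem l d (by omega)]
        simp

lemma clamp_map_int {α : Type} (d : α) (r : Int) (hr : 0 ≤ r) (l : List α) (hl : 0 < l.length) :
    (PySem.List.pyRange 0 ((l.length : Int) + 2*r) 1).map (fun x =>
      PySem.List.pyGetD l (if x < r then 0 else if (l.length : Int) + r ≤ x then (l.length : Int) - 1 else x - r) d)
    = List.replicate r.toNat (l.headD d) ++ l ++ List.replicate r.toNat (l.getLastD d) := by
  rw [PySem.List.pyRange_one, List.map_map]
  have hm : ((l.length : Int) + 2*r - 0).toNat = l.length + (r.toNat + r.toNat) := by omega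
  rw [hm]
  have hf : ((fun x : Int => PySem.List.pyGetD l (if x < r then 0 else if (l.length : Int) + r ≤ x then (l.length : Int) - 1 else x - r) d) ∘ (fun j : ℕ => (0:Int) + j))
      = (fun y : ℕ => l.getD (if y < r.toNat then 0 else if l.length + r.toNat ≤ y then l.length - 1 else y - r.toNat) d) := by
    funext y
    simp only [Function.comp, zero_add]
    by_cases h1 : (y : Int) < r
    · rw [if_pos h1, if_pos (by omega), PySem.List.pyGetD_zero]
    · by_cases h2 : (l.length : Int) + r ≤ (y : Int)
      · rw [if_neg h1, if_pos h2, if_neg (by omega), if_pos (by omega)]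
        have : (l.length : Int) - 1 = ((l.length - 1 : ℕ) : Int) := by omega
        rw [this, PySem.List.pyGetD_natCast]
      · rw [if_neg h1, if_neg h2, if_neg (by omega), if_neg (by omega)]
        have : (y : Int) - r = ((y - r.toNat : ℕ) : Int) := by omega
        rw [this, PySem.List.pyGetD_natCast]
  rw [hf]
  exact clamp_map d l hl r.toNat

lemma getD_zero_eq_headD {α : Type} (l : List α) (d : α) : l.getD 0 d = l.headD d := by
  cases l <;> rfl

lemma getLastD_eq_getElem {α : Type} (l : List α) (d : α) (h : 0 < l.length) :
    l.getLastD d = l[l.length - 1]'(by omega) := by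
  rw [List.getLastD_eq_getLast?, List.getLast?_eq_getElem?]
  simp [List.getElem?_eq_getElem (by omega : l.length - 1 < l.length)]

lemma map_const_pyRange {α : Type} (r : Int) (c : α) :
    (PySem.List.pyRange 0 r 1).map (fun _ => c) = List.replicate r.toNat c := by
  rw [PySem.List.pyRange_one, List.map_map]
  simp [Function.comp_def, List.map_const']

theorem pad_replicate_equiv : ∀ (gray : List (List Int)) (r : Int),
    Pre_pad_replicate gray r → pad_replicate gray r = pad_replicate_alt gray r := by
  intro gray r hpre
  obtain ⟨hr, hne, hhne, hrect⟩ := hpre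
  obtain ⟨a, t, rfl⟩ := List.exists_cons_of_ne_nil hne
  have hw : 0 < a.length := by
    simpa using List.length_pos_of_ne_nil (by simpa using hhne)
  have hrect' : ∀ row ∈ a :: t, row.length = a.length := by simpa using hrect
  -- the inner row map of A, as a function of the fetched row
  set g : List Int → List Int := fun row =>
    (PySem.List.pyRange 0 ((a.length : Int) + 2*r) 1).map (fun x =>
      PySem.List.pyGetD row (if x < r then 0 else if (a.length : Int) + r ≤ x then (a.length : Int) - 1 else x - r) 0)
    with hg
  -- B's per-row padding
  set f : List Int → List Int := fun row =>
    PySem.List.pyRepeat [PySem.List.pyGetD row 0 0] r ++ row ++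
    PySem.List.pyRepeat [PySem.List.pyGetD row (-1) 0] r with hf
  have hgf : ∀ row ∈ a :: t, g row = f row := by
    intro row hrow
    have hlen : row.length = a.length := hrect' row hrow
    have hpos : 0 < row.length := by omega
    have hne' : row ≠ [] := by
      cases row
      · simp at hpos
      · simp
    have hA : g row = List.replicate r.toNat (row.headD 0) ++ row ++ List.replicate r.toNat (row.getLastD 0) := by
      rw [hg]
      simp only [← hlen]
      exact clamp_map_int 0 r hr row hpos
    have hB : f row = List.replicate r.toNat (row.headD 0) ++ row ++ List.replicate r.toNat (row.getLastD 0) := by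
      rw [hf]
      simp only [PySem.List.pyRepeat_singleton, PySem.List.pyGetD_zero,
        getD_zero_eq_headD, PySem.List.pyGetD_neg_one row 0 hne']
      have : row.getLast hne' = row.getLastD 0 := by
        rw [List.getLastD_eq_getLast?, List.getLast?_eq_some_getLast hne']
        rfl
      rw [this]
    rw [hA, hB]
  have hA2 : pad_replicate (a :: t) r =
      ((PySem.List.pyRange 0 (((a :: t).length : Int) + 2*r) 1).map (fun y =>
        PySem.List.pyGetD (a :: t) (if y < r then 0 else if ((a :: t).length : Int) + r ≤ y then ((a :: t).length : Int) - 1 else y - r) [])).map g := by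
    unfold pad_replicate
    rw [List.map_map]
    apply List.map_congr_left
    intro y _
    simp only [Function.comp, hg, PySem.List.pyGetD_zero_cons]
  have hmain : pad_replicate (a :: t) r =
      List.replicate r.toNat (g a) ++ (a :: t).map g ++ List.replicate r.toNat (g ((a :: t).getLastD [])) := by
    rw [hA2, clamp_map_int [] r hr (a :: t) (by simp)]
    simp [List.map_append, List.map_replicate]
  have hPne : (a :: t).map f ≠ [] := by simp
  have hB2 : pad_replicate_alt (a :: t) r =
      List.replicate r.toNat (f a) ++ (a :: t).map f ++ List.replicate r.toNat (f ((a :: t).getLastD [])) := by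
    unfold pad_replicate_alt
    dsimp only
    rw [← hf]
    rw [map_const_pyRange, map_const_pyRange]
    have h0 : PySem.List.pyGetD ((a :: t).map f) 0 [] = f a := by
      simp only [List.map_cons, PySem.List.pyGetD_zero_cons]
    have h1 : PySem.List.pyGetD ((a :: t).map f) (-1) [] = f ((a :: t).getLastD []) := by
      rw [PySem.List.pyGetD_neg_one _ [] hPne]
      have hlp : 0 < ((a :: t).map f).length := by simp
      have : ((a :: t).map f).getLast hPne = ((a :: t).map f)[((a :: t).map f).length - 1]'(by omega) := by
        rw [List.getLast_eq_getElem]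
      rw [this]
      rw [getLastD_eq_getElem (a :: t) [] (by simp)]
      simp only [List.length_map, List.length_cons, Nat.add_sub_cancel]
      rw [List.getElem_map]
    rw [h0, h1]
  rw [hmain, hB2, hgf a (by simp), List.map_congr_left hgf,
      hgf ((a :: t).getLastD []) ?_]
  · rw [getLastD_eq_getElem (a :: t) [] (by simp)]
    exact List.getElem_mem _

-- ===== VERDICT (by name: the statement is the Claim_ definition above) =====
theorem pad_replicate_spec : Claim_equal_pad_replicate := by
  intro gray r _ hpre
  exact pad_replicate_equiv gray r hpre
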